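-- pv_equiv track=rewrite | github.com/jaeyonglee3/LeetCode | 2840-check-if-strings-can-be-made-equal-with-operations-ii/2840-check-if-strings-can-be-made-equal-with-operations-ii.py | checkStrings
-- ===== SOURCE A (Python) =====
-- def checkStrings(s1: str, s2: str) -> bool:
--     # try to make s1 into s2
--     # an even index can only swap with an even index
--     # an odd index can only swap with an odd index
--
--     # To be able to make the two strings equal,
--     # the characters at even and odd positions
--     # in the strings should be the same.
--
--     s1_evens, s1_odds = [], []
--     for i, c in enumerate(s1):
--         if i % 2 == 0:
--             s1_evens.append(c)
--         else:
--             s1_odds.append(c)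
--
--     s2_evens, s2_odds = [], []
--     for i, c in enumerate(s2):
--         if i % 2 == 0:
--             s2_evens.append(c)
--         else:
--             s2_odds.append(c)
--
--     s1_evens.sort()
--     s2_evens.sort()
--     s1_odds.sort()
--     s2_odds.sort()
--
--     return s1_evens == s2_evens and s1_odds == s2_odds
-- ===== SOURCE B (Python) =====
-- def checkStrings(s1: str, s2: str) -> bool:
--     # one pass per string: a signed counter keyed by (index parity, char);
--     # the strings are same-parity-rearrangeable iff every count cancels to 0
--     diff = {}
--     for i, c in enumerate(s1):
--         k = (i % 2, c)
--         diff[k] = diff.get(k, 0) + 1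
--     for i, c in enumerate(s2):
--         k = (i % 2, c)
--         diff[k] = diff.get(k, 0) - 1
--     return all(v == 0 for v in diff.values())
-- ===== Notes on version B (the rewrite author's own statement) =====
-- stated objective: alternative
-- what changed: Replaces the four parity-split-then-sort lists and sorted-list comparisons with a single signed hash counter keyed by (index parity, char), returning whether every count cancels to zero.
import Mathlib
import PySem

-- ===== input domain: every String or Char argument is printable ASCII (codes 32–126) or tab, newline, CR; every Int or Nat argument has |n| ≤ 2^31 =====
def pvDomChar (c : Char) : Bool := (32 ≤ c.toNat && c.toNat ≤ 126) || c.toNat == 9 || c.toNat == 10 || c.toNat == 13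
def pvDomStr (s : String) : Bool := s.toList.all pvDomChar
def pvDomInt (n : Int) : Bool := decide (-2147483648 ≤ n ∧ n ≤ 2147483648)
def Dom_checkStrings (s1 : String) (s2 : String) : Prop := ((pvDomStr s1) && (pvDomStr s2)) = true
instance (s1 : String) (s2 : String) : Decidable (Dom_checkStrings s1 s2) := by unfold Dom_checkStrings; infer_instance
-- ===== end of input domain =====

-- B replaces A's four sorted parity lists with one signed (parity, char) hash counter checked for all-zero (objective: alternative; not measurably faster in CPython).


-- ===== PORT A =====
def checkStrings (s1 : String) (s2 : String) : Bool :=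
  let p1 := (PySem.List.enumerate s1.toList).foldl
    (fun (ac : List Char × List Char) ic =>
      if PySem.Int.mod ic.1 2 == 0 then (ac.1 ++ [ic.2], ac.2) else (ac.1, ac.2 ++ [ic.2]))
    ([], [])
  let p2 := (PySem.List.enumerate s2.toList).foldl
    (fun (ac : List Char × List Char) ic =>
      if PySem.Int.mod ic.1 2 == 0 then (ac.1 ++ [ic.2], ac.2) else (ac.1, ac.2 ++ [ic.2]))
    ([], [])
  decide (PySem.List.sorted p1.1 (fun x => x) false = PySem.List.sorted p2.1 (fun x => x) false) &&
    decide (PySem.List.sorted p1.2 (fun x => x) false = PySem.List.sorted p2.2 (fun x => x) false)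

-- ===== PORT B =====
def checkStrings_alt (s1 : String) (s2 : String) : Bool :=
  let d1 := (PySem.List.enumerate s1.toList).foldl
    (fun (d : PySem.Dict (Int × Char) Int) ic =>
      let k := (PySem.Int.mod ic.1 2, ic.2)
      d.insert k (d.getD k 0 + 1))
    PySem.Dict.empty
  let d2 := (PySem.List.enumerate s2.toList).foldl
    (fun (d : PySem.Dict (Int × Char) Int) ic =>
      let k := (PySem.Int.mod ic.1 2, ic.2)
      d.insert k (d.getD k 0 - 1))
    d1
  d2.values.all (fun v => v == 0)

-- ===== PRECONDITION & SPEC =====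
def Spec_checkStrings (s1 : String) (s2 : String) (out : Bool) : Prop := out = checkStrings_alt s1 s2
instance (s1 : String) (s2 : String) (out : Bool) : Decidable (Spec_checkStrings s1 s2 out) := by unfold Spec_checkStrings; infer_instance

-- ===== CLAIM (what is proved, stated in full; the proofs are below) =====
def Claim_equal_checkStrings : Prop := ∀ (s1 : String) (s2 : String), Dom_checkStrings s1 s2 → Spec_checkStrings s1 s2 (checkStrings s1 s2)

-- ===== LEMMAS AND PROOFS =====

-- the (parity, char) keyed list of a string's characters
def pvKeyed (l : List Char) : List (Int × Char) :=
  (PySem.List.enumerate l).map (fun ic => (PySem.Int.mod ic.1 2, ic.2))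

-- characters at even / odd positions
def pvEv (l : List Char) : List Char :=
  ((PySem.List.enumerate l).filter (fun ic => PySem.Int.mod ic.1 2 == 0)).map (·.2)
def pvOd (l : List Char) : List Char :=
  ((PySem.List.enumerate l).filter (fun ic => !(PySem.Int.mod ic.1 2 == 0))).map (·.2)

theorem pvMod_two (a : Int) : PySem.Int.mod a 2 = a % 2 :=
  PySem.Int.mod_eq_emod_of_pos (by norm_num)

theorem pvMod2 (i : Int) : PySem.Int.mod i 2 = 0 ∨ PySem.Int.mod i 2 = 1 := by
  have h1 := PySem.Int.mod_nonneg i (b := 2) (by norm_num)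
  have h2 := PySem.Int.mod_lt i (b := 2) (by norm_num)
  omega

theorem pvOdd_pred (i : Int) : (!(PySem.Int.mod i 2 == 0)) = (PySem.Int.mod i 2 == 1) := by
  rcases pvMod2 i with h | h <;> rw [h] <;> rfl

theorem pvPairSplit (l : List Char) :
    (PySem.List.enumerate l).foldl
      (fun (ac : List Char × List Char) ic =>
        if PySem.Int.mod ic.1 2 == 0 then (ac.1 ++ [ic.2], ac.2) else (ac.1, ac.2 ++ [ic.2]))
      ([], []) = (pvEv l, pvOd l) := by
  have e1 : (fun (ac : List Char × List Char) (ic : Int × Char) =>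
      if PySem.Int.mod ic.1 2 == 0 then (ac.1 ++ [ic.2], ac.2) else (ac.1, ac.2 ++ [ic.2]))
      = (fun ac ic =>
        ((fun (a : List Char) (ic : Int × Char) =>
            if PySem.Int.mod ic.1 2 == 0 then a ++ [ic.2] else a) ac.1 ic,
         (fun (a : List Char) (ic : Int × Char) =>
            if !(PySem.Int.mod ic.1 2 == 0) then a ++ [ic.2] else a) ac.2 ic)) := by
    funext ac ic
    by_cases hp : (PySem.Int.mod ic.1 2 == 0) = true
    · simp only [hp, Bool.not_true, reduceIte]
      rfl
    · have hp' : (PySem.Int.mod ic.1 2 == 0) = false := by simpa using hp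
      simp only [hp', Bool.not_false, reduceIte]
      rfl
  rw [e1, PySem.List.foldl_prod_mk
    (f := fun (a : List Char) (ic : Int × Char) =>
      if PySem.Int.mod ic.1 2 == 0 then a ++ [ic.2] else a)
    (g := fun (a : List Char) (ic : Int × Char) =>
      if !(PySem.Int.mod ic.1 2 == 0) then a ++ [ic.2] else a)]
  rw [PySem.List.foldl_append_if, PySem.List.foldl_append_if]
  simp only [pvEv, pvOd, List.nil_append]

theorem pvA_char (s1 s2 : String) :
    checkStrings s1 s2 =
      (decide (PySem.List.sorted (pvEv s1.toList) (fun x => x) false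
        = PySem.List.sorted (pvEv s2.toList) (fun x => x) false) &&
       decide (PySem.List.sorted (pvOd s1.toList) (fun x => x) false
        = PySem.List.sorted (pvOd s2.toList) (fun x => x) false)) := by
  unfold checkStrings
  simp only [pvPairSplit]

theorem pvA_iff (s1 s2 : String) :
    checkStrings s1 s2 = true ↔
      (pvEv s1.toList).Perm (pvEv s2.toList) ∧ (pvOd s1.toList).Perm (pvOd s2.toList) := by
  rw [pvA_char]
  simp [PySem.List.sorted_id_eq_sorted_id_iff_perm]

theorem pvCount_keyed (L : List (Int × Char)) (b : Int) (c : Char) :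
    ((L.map (fun ic => (PySem.Int.mod ic.1 2, ic.2))).count (b, c))
      = ((L.filter (fun ic => PySem.Int.mod ic.1 2 == b)).map (·.2)).count c := by
  simp only [pvMod_two]
  induction L with
  | nil => rfl
  | cons p L ih =>
    by_cases h1 : p.1 % 2 = b <;> by_cases h2 : p.2 = c <;>
      simp [h1, h2, ih, Prod.ext_iff]

theorem pvCount_ev (l : List Char) (c : Char) :
    (pvKeyed l).count (0, c) = (pvEv l).count c := by
  rw [pvKeyed, pvCount_keyed]
  rfl

theorem pvCount_od (l : List Char) (c : Char) :
    (pvKeyed l).count (1, c) = (pvOd l).count c := by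
  rw [pvKeyed, pvCount_keyed, pvOd]
  simp only [pvOdd_pred]

theorem pvKeyed_fst (l : List Char) (x : Int × Char) (hx : x ∈ pvKeyed l) :
    x.1 = 0 ∨ x.1 = 1 := by
  rw [pvKeyed, List.mem_map] at hx
  obtain ⟨ic, _, rfl⟩ := hx
  exact pvMod2 ic.1

theorem pvKeyed_perm_iff (s1 s2 : String) :
    (pvKeyed s1.toList).Perm (pvKeyed s2.toList) ↔
      (pvEv s1.toList).Perm (pvEv s2.toList) ∧ (pvOd s1.toList).Perm (pvOd s2.toList) := by
  constructor
  · intro h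
    rw [List.perm_iff_count] at h
    constructor <;> rw [List.perm_iff_count] <;> intro c
    · rw [← pvCount_ev, ← pvCount_ev, h]
    · rw [← pvCount_od, ← pvCount_od, h]
  · rintro ⟨hE, hO⟩
    rw [List.perm_iff_count] at hE hO ⊢
    rintro ⟨b, c⟩
    by_cases hb0 : b = 0
    · subst hb0; rw [pvCount_ev, pvCount_ev]; exact hE c
    by_cases hb1 : b = 1
    · subst hb1; rw [pvCount_od, pvCount_od]; exact hO c
    · rw [List.count_eq_zero_of_not_mem, List.count_eq_zero_of_not_mem]
      · intro hm; rcases pvKeyed_fst _ _ hm with h | h <;> simp_all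
      · intro hm; rcases pvKeyed_fst _ _ hm with h | h <;> simp_all

theorem pvGetD_sub (l : List (Int × Char)) (d : PySem.Dict (Int × Char) Int) (v : Int × Char) :
    (l.foldl (fun d x => d.insert x (d.getD x 0 - 1)) d).getD v 0 = d.getD v 0 - l.count v := by
  induction l generalizing d with
  | nil => simp
  | cons x l ih =>
    rw [List.foldl_cons, ih]
    by_cases hv : v = x
    · subst hv
      rw [PySem.Dict.getD_insert_self, List.count_cons_self]
      push_cast
      ring
    · rw [PySem.Dict.getD_insert_of_ne _ _ _ hv]
      simp [Ne.symm hv]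

theorem pvMem_update {α : Type} [BEq α] [LawfulBEq α] (xs : List α) (s : PySem.Set α) (y : α) :
    y ∈ PySem.Set.update s xs ↔ y ∈ s ∨ y ∈ xs := by
  induction xs generalizing s with
  | nil =>
    have h0 : PySem.Set.update s [] = s := rfl
    rw [h0]
    simp
  | cons x xs ih =>
    have h0 : PySem.Set.update s (x :: xs) = PySem.Set.update (PySem.Set.add s x) xs := rfl
    rw [h0, ih, PySem.Set.mem_add]
    simp only [List.mem_cons]
    tauto

theorem pvB_folds (s1 s2 : String) :
    checkStrings_alt s1 s2 =
      ((pvKeyed s2.toList).foldl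
        (fun (d : PySem.Dict (Int × Char) Int) k => d.insert k (d.getD k 0 - 1))
        ((pvKeyed s1.toList).foldl
          (fun (d : PySem.Dict (Int × Char) Int) k => d.insert k (d.getD k 0 + 1))
          PySem.Dict.empty)).values.all (fun v => v == 0) := by
  unfold checkStrings_alt
  rw [pvKeyed, pvKeyed, List.foldl_map, List.foldl_map]

theorem pvB_iff (s1 s2 : String) :
    checkStrings_alt s1 s2 = true ↔ (pvKeyed s1.toList).Perm (pvKeyed s2.toList) := by
  rw [pvB_folds]
  set K1 := pvKeyed s1.toList with hK1
  set K2 := pvKeyed s2.toList with hK2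
  set d1 := K1.foldl (fun (d : PySem.Dict (Int × Char) Int) k => d.insert k (d.getD k 0 + 1))
    PySem.Dict.empty with hd1
  set d2 := K2.foldl (fun (d : PySem.Dict (Int × Char) Int) k => d.insert k (d.getD k 0 - 1))
    d1 with hd2
  have hg1 : ∀ v, d1.getD v 0 = (K1.count v : Int) := by
    intro v
    rw [hd1, PySem.Dict.getD_foldl_insert_add_one]
    simp
  have hg2 : ∀ v, d2.getD v 0 = (K1.count v : Int) - (K2.count v : Int) := by
    intro v
    rw [hd2, pvGetD_sub, hg1]
  have hnd1 : d1.keys.Nodup := by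
    rw [hd1]
    exact PySem.Dict.nodup_keys_foldl_insert _ _ _ (by simp)
  have hnd2 : d2.keys.Nodup := by
    rw [hd2]
    exact PySem.Dict.nodup_keys_foldl_insert _ _ _ hnd1
  have hk2 : ∀ v, v ∈ d2.keys ↔ v ∈ K1 ∨ v ∈ K2 := by
    intro v
    rw [hd2, PySem.Dict.keys_foldl_insert, pvMem_update, hd1, PySem.Dict.keys_foldl_insert,
      pvMem_update]
    simp [PySem.Dict.keys_empty]
  rw [PySem.Dict.values_eq_map_keys d2 hnd2 0]
  simp only [List.all_eq_true, List.mem_map, forall_exists_index, and_imp]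
  rw [List.perm_iff_count]
  constructor
  · intro h v
    by_cases hm : v ∈ K1 ∨ v ∈ K2
    · have hv := h (d2.getD v 0) v ((hk2 v).2 hm) rfl
      rw [hg2 v] at hv
      simp only [beq_iff_eq] at hv
      omega
    · push_neg at hm
      rw [List.count_eq_zero_of_not_mem hm.1, List.count_eq_zero_of_not_mem hm.2]
  · intro h x k hk hx
    subst hx
    rw [hg2 k, h k]
    simp

-- ===== VERDICT (by name: the statement is the Claim_ definition above) =====
theorem checkStrings_spec : Claim_equal_checkStrings := by
  intro s1 s2 _
  unfold Spec_checkStrings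
  rw [Bool.eq_iff_iff, pvA_iff, pvB_iff, pvKeyed_perm_iff]
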